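-- pv_equiv track=rewrite | github.com/pokerdio/generic | euler/euler-287.py | belch
-- ===== SOURCE A (Python) =====
-- def belch(x0, y0, x1, y1, half):
--     if x0 == x1:
--         return 2
--
--     """the coords gonna be inclusive 0,0,1,1 is a 2 length square"""
--     minx, maxx = sorted(((x0 - half) ** 2, (x1 - half) ** 2))
--     miny, maxy = sorted(((y0 - half) ** 2, (y1 - half) ** 2))
--
--     mincolor = (minx + miny <= half * half)
--     maxcolor = (maxx + maxy <= half * half)
--
--     if mincolor == maxcolor:
--         return 2
--
--     x2 = (x0 + x1) // 2
--     y2 = (y0 + y1) // 2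
--
--     return 1 + belch(x0, y0, x2, y2, half) +\
--         belch(x0, y2 + 1, x2, y1, half) +\
--         belch(x2 + 1, y0, x1, y2, half) +\
--         belch(x2 + 1, y2 + 1, x1, y1, half)
-- ===== SOURCE B (Python) =====
-- def belch(x0, y0, x1, y1, half):
--     """Iterative version: explicit stack of inclusive squares + integer accumulator."""
--     stack = [(x0, y0, x1, y1)]
--     total = 0
--     while stack:
--         x0, y0, x1, y1 = stack.pop()
--         if x0 >= x1:  # degenerate or single-cell square: a leaf
--             total += 2
--             continue
--         minx, maxx = sorted(((x0 - half) ** 2, (x1 - half) ** 2))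
--         miny, maxy = sorted(((y0 - half) ** 2, (y1 - half) ** 2))
--         mincolor = (minx + miny <= half * half)
--         maxcolor = (maxx + maxy <= half * half)
--         if mincolor == maxcolor:
--             total += 2
--             continue
--         x2 = (x0 + x1) // 2
--         y2 = (y0 + y1) // 2
--         total += 1
--         stack.append((x0, y0, x2, y2))
--         stack.append((x0, y2 + 1, x2, y1))
--         stack.append((x2 + 1, y0, x1, y2))
--         stack.append((x2 + 1, y2 + 1, x1, y1))
--     return total
-- ===== Notes on version B (the rewrite author's own statement) =====
-- stated objective: alternative
-- what changed: Replaced the four-way recursion by an iterative worklist: an explicit stack of (x0,y0,x1,y1) squares and an integer accumulator, popping one square per step, treating degenerate squares (x0 >= x1) and uniformly colored squares as leaves and pushing the four quadrants otherwise.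
-- outside the precondition, e.g. on belch(19, -19, 16, 6, 14): A returns 23, B returns 2; on belch(1, 0, 0, 0, 1): A raises RecursionError, B returns 2
import Mathlib
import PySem

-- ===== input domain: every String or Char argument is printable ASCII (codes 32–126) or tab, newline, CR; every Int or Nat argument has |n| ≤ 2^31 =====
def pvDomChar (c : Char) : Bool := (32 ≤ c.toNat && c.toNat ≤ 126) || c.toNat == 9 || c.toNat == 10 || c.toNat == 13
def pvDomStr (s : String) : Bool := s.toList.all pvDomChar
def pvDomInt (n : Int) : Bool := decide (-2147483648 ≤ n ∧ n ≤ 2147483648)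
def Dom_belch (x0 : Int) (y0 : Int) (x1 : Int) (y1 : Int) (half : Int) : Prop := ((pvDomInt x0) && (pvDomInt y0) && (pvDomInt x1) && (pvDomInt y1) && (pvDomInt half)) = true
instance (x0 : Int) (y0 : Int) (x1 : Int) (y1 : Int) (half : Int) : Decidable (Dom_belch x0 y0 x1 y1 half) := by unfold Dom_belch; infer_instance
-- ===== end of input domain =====

-- B replaces A's four-way recursion by an iterative worklist (explicit stack + accumulator); same cost, no deep Python recursion.


-- ===== PORT A =====
-- the 'if h : x0 < x1' guard is a totality guard only: when x1 < x0 and the colors differ,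
-- the Python recursion never reaches its base case (such inputs lie outside Pre_belch).
def belch (x0 : Int) (y0 : Int) (x1 : Int) (y1 : Int) (half : Int) : Int :=
  if x0 = x1 then 2
  else
    let minx := min ((x0 - half) ^ 2) ((x1 - half) ^ 2)
    let maxx := max ((x0 - half) ^ 2) ((x1 - half) ^ 2)
    let miny := min ((y0 - half) ^ 2) ((y1 - half) ^ 2)
    let maxy := max ((y0 - half) ^ 2) ((y1 - half) ^ 2)
    let mincolor := decide (minx + miny ≤ half * half)
    let maxcolor := decide (maxx + maxy ≤ half * half)
    if mincolor = maxcolor then 2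
    else if _h : x0 < x1 then
      let x2 := PySem.Int.floordiv (x0 + x1) 2
      let y2 := PySem.Int.floordiv (y0 + y1) 2
      1 + belch x0 y0 x2 y2 half + belch x0 (y2 + 1) x2 y1 half
        + belch (x2 + 1) y0 x1 y2 half + belch (x2 + 1) (y2 + 1) x1 y1 half
    else 2
termination_by (x1 - x0).toNat
decreasing_by
  all_goals
    (rw [PySem.Int.floordiv_eq_ediv_of_pos (by omega : (0:Int) < 2)]; omega)

-- ===== PORT B =====
-- iterative worklist: pop a square from the stack; a degenerate or single-cell square
-- (x0 >= x1) is a leaf (+2), a uniformly colored square is a leaf (+2), otherwise count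
-- the internal node (+1) and push the four quadrants.
def belchLoop (half : Int) (stack : List (Int × Int × Int × Int)) (total : Int) : Int :=
  match stack with
  | [] => total
  | (x0, y0, x1, y1) :: rest =>
    if _h : x1 ≤ x0 then belchLoop half rest (total + 2)
    else
      let minx := min ((x0 - half) ^ 2) ((x1 - half) ^ 2)
      let maxx := max ((x0 - half) ^ 2) ((x1 - half) ^ 2)
      let miny := min ((y0 - half) ^ 2) ((y1 - half) ^ 2)
      let maxy := max ((y0 - half) ^ 2) ((y1 - half) ^ 2)
      let mincolor := decide (minx + miny ≤ half * half)
      let maxcolor := decide (maxx + maxy ≤ half * half)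
      if mincolor = maxcolor then belchLoop half rest (total + 2)
      else
        let x2 := PySem.Int.floordiv (x0 + x1) 2
        let y2 := PySem.Int.floordiv (y0 + y1) 2
        belchLoop half
          ((x0, y0, x2, y2) :: (x0, y2 + 1, x2, y1) ::
           (x2 + 1, y0, x1, y2) :: (x2 + 1, y2 + 1, x1, y1) :: rest) (total + 1)
termination_by (stack.map (fun s => 5 ^ (s.2.2.1 - s.1).toNat)).sum
decreasing_by
  · simp only [List.map_cons, List.sum_cons]
    have h5 : 0 < 5 ^ (x1 - x0).toNat := Nat.pow_pos (by norm_num)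
    omega
  · simp only [List.map_cons, List.sum_cons]
    have h5 : 0 < 5 ^ (x1 - x0).toNat := Nat.pow_pos (by norm_num)
    omega
  · simp only [List.map_cons, List.sum_cons]
    have h2 : PySem.Int.floordiv (x0 + x1) 2 = (x0 + x1) / 2 :=
      PySem.Int.floordiv_eq_ediv_of_pos (by omega)
    obtain ⟨m, hm⟩ : ∃ m, (x1 - x0).toNat = m + 1 := ⟨(x1 - x0).toNat - 1, by omega⟩
    have hpa : 5 ^ (PySem.Int.floordiv (x0 + x1) 2 - x0).toNat ≤ 5 ^ m :=
      Nat.pow_le_pow_right (by norm_num) (by rw [h2]; omega)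
    have hpb : 5 ^ (x1 - (PySem.Int.floordiv (x0 + x1) 2 + 1)).toNat ≤ 5 ^ m :=
      Nat.pow_le_pow_right (by norm_num) (by rw [h2]; omega)
    have hc : 0 < 5 ^ m := Nat.pow_pos (by norm_num)
    rw [hm, pow_succ]
    omega

def belch_alt (x0 : Int) (y0 : Int) (x1 : Int) (y1 : Int) (half : Int) : Int :=
  belchLoop half [(x0, y0, x1, y1)] 0


-- ===== PRECONDITION & SPEC =====
-- Pre_ restricts to the function's natural domain of non-inverted squares (x0 ≤ x1), plus the
-- inverted squares on which the top-level color test ties (A returns 2 at once).  On the remaining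
-- inverted squares A's recursion never reaches its base case and in general raises RecursionError
-- (occasionally returning an accidental deep-tie count), while B treats any x0 >= x1 square as a leaf.
def Pre_belch (x0 : Int) (y0 : Int) (x1 : Int) (y1 : Int) (half : Int) : Prop :=
  x0 ≤ x1 ∨
    (min ((x0 - half) ^ 2) ((x1 - half) ^ 2) + min ((y0 - half) ^ 2) ((y1 - half) ^ 2) ≤ half * half ↔
     max ((x0 - half) ^ 2) ((x1 - half) ^ 2) + max ((y0 - half) ^ 2) ((y1 - half) ^ 2) ≤ half * half)
instance (x0 : Int) (y0 : Int) (x1 : Int) (y1 : Int) (half : Int) : Decidable (Pre_belch x0 y0 x1 y1 half) := by unfold Pre_belch; infer_instance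

def pvWitness_belch : Int × Int × Int × Int × Int := (0, 0, 3, 3, 2)

def Spec_belch (x0 : Int) (y0 : Int) (x1 : Int) (y1 : Int) (half : Int) (out : Int) : Prop := out = belch_alt x0 y0 x1 y1 half
instance (x0 : Int) (y0 : Int) (x1 : Int) (y1 : Int) (half : Int) (out : Int) : Decidable (Spec_belch x0 y0 x1 y1 half out) := by unfold Spec_belch; infer_instance

-- ===== CLAIM (what is proved, stated in full; the proofs are below) =====
def Claim_equal_belch : Prop := ∀ (x0 : Int) (y0 : Int) (x1 : Int) (y1 : Int) (half : Int), Dom_belch x0 y0 x1 y1 half → Pre_belch x0 y0 x1 y1 half → Spec_belch x0 y0 x1 y1 half (belch x0 y0 x1 y1 half)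

-- ===== LEMMAS AND PROOFS =====

theorem belch_cons (x0 y0 x1 y1 half : Int) :
    belch x0 y0 x1 y1 half =
      if x0 = x1 then 2
      else
        if decide (min ((x0 - half) ^ 2) ((x1 - half) ^ 2) + min ((y0 - half) ^ 2) ((y1 - half) ^ 2) ≤ half * half)
             = decide (max ((x0 - half) ^ 2) ((x1 - half) ^ 2) + max ((y0 - half) ^ 2) ((y1 - half) ^ 2) ≤ half * half) then 2
        else if _h : x0 < x1 then
          1 + belch x0 y0 (PySem.Int.floordiv (x0 + x1) 2) (PySem.Int.floordiv (y0 + y1) 2) half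
            + belch x0 (PySem.Int.floordiv (y0 + y1) 2 + 1) (PySem.Int.floordiv (x0 + x1) 2) y1 half
            + belch (PySem.Int.floordiv (x0 + x1) 2 + 1) y0 x1 (PySem.Int.floordiv (y0 + y1) 2) half
            + belch (PySem.Int.floordiv (x0 + x1) 2 + 1) (PySem.Int.floordiv (y0 + y1) 2 + 1) x1 y1 half
        else 2 := by
  rw [belch.eq_def]

theorem belchLoop_eq (half : Int) (stack : List (Int × Int × Int × Int)) (total : Int) :
    belchLoop half stack total
      = total + (stack.map (fun s => belch s.1 s.2.1 s.2.2.1 s.2.2.2 half)).sum := by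
  fun_induction belchLoop half stack total with
  | case1 total => simp
  | case2 total x0 y0 x1 y1 rest h1 ih =>
    rw [ih]
    simp only [List.map_cons, List.sum_cons]
    conv_rhs => rw [belch_cons]
    split_ifs <;> omega
  | case3 total x0 y0 x1 y1 rest h1 minx maxx miny maxy minc maxc h2 ih =>
    rw [ih]
    conv_rhs => rw [List.map_cons, List.sum_cons, belch_cons]
    rw [if_neg (by omega : ¬ x0 = x1), if_pos h2]
    omega
  | case4 total x0 y0 x1 y1 rest h1 minx maxx miny maxy minc maxc h2 x2 y2 ih =>
    have hx2 : x2 = PySem.Int.floordiv (x0 + x1) 2 := rfl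
    have hy2 : y2 = PySem.Int.floordiv (y0 + y1) 2 := rfl
    rw [hx2, hy2] at ih ⊢
    rw [ih]
    conv_rhs => rw [List.map_cons, List.sum_cons, belch_cons]
    rw [if_neg (by omega : ¬ x0 = x1), if_neg h2, dif_pos (by omega : x0 < x1)]
    simp only [List.map_cons, List.sum_cons]
    omega

-- ===== VERDICT (by name: the statement is the Claim_ definition above) =====
theorem belch_spec : Claim_equal_belch := by
  intro x0 y0 x1 y1 half _ _
  unfold Spec_belch belch_alt
  rw [belchLoop_eq]
  simp
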